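-- pv_equiv track=rewrite | github.com/jmseb3/bakjoon | Prgrammers/lv2/거리두기 확인하기.py | check
-- ===== SOURCE A (Python) =====
-- def check(y, x, arr):
--     dy = [-1, 0, 1, 0]
--     dx = [0, 1, 0, -1]
--     real = [
--         [(-2, 0), (-1, 1), (-1, -1)],
--         [(0, 2), (1, 1), (-1, 1)],
--         [(2, 0), (1, -1), (1, 1)],
--         [(0,-2),(1,-1),(-1,-1)]
--     ]
--     next_ck =set()
--     for idx in range(4):
--         ny = y+dy[idx]
--         nx = x+dx[idx]
--         if ny < 0 or nx < 0 or nx >= 5 or ny >= 5: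
--             continue
--         if arr[ny][nx] == 'P':
--             return False
--         if arr[ny][nx] == 'X':
--             continue
--         if arr[ny][nx] == 'O':
--             next_ck.update(real[idx])
--
--     for dy,dx in next_ck:
--         ny = y+dy
--         nx = x+dx
--         if ny < 0 or nx < 0 or nx >= 5 or ny >= 5:
--             continue
--         if arr[ny][nx] == 'P':
--             return False
--         if arr[ny][nx] == 'X':
--             continue
--         if arr[ny][nx] == 'O':
--             continue
--
--     return True
-- ===== SOURCE B (Python) =====
-- def check(y, x, arr):
--     DIRS = [
--         (-1, 0, [(-2, 0), (-1, 1), (-1, -1)]),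
--         (0, 1, [(0, 2), (1, 1), (-1, 1)]),
--         (1, 0, [(2, 0), (1, -1), (1, 1)]),
--         (0, -1, [(0, -2), (1, -1), (-1, -1)]),
--     ]
--     for d1, d2, real in DIRS:
--         ny, nx = y + d1, x + d2
--         if not (0 <= ny < 5 and 0 <= nx < 5):
--             continue
--         c = arr[ny][nx]
--         if c == 'P':
--             return False
--         if c == 'O':
--             for ry, rx in real:
--                 my, mx = y + ry, x + rx
--                 if 0 <= my < 5 and 0 <= mx < 5 and arr[my][mx] == 'P':
--                     return False
--     return True
-- ===== Notes on version B (the rewrite author's own statement) =====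
-- stated objective: simpler
-- what changed: Collapsed A's two sequential passes (collect a dedup set of secondary offsets for 'O' neighbours, then scan the set) into one pass over the four directions that checks each 'O' direction's three secondary cells immediately, dropping the intermediate set and the dead 'X'/'O' branches of the second pass.
-- outside the precondition, e.g. on check(0, 0, [['X', 'P']]): A returns False, B returns False
import Mathlib
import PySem

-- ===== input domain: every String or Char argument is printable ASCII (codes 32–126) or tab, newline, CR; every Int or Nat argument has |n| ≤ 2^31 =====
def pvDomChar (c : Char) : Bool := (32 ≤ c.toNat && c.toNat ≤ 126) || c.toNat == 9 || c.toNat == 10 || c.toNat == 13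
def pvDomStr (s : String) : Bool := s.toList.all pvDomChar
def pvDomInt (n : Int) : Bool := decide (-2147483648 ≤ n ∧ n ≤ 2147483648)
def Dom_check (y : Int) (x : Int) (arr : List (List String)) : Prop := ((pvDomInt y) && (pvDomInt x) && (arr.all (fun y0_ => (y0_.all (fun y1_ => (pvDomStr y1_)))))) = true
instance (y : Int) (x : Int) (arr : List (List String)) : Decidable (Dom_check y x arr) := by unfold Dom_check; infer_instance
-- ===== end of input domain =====

-- B collapses A's two passes (collect a set of secondary offsets, then scan it) into one
-- pass that checks each 'O' direction's secondary cells immediately; simpler, no set.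

-- shared helper: arr[ny][nx] as an Option (none = IndexError)
def checkCell (arr : List (List String)) (ny nx : Int) : Option String :=
  (PySem.List.pyGet? arr ny).bind (fun row => PySem.List.pyGet? row nx)

-- ===== PORT A =====
-- for idx in range(4) over dy/dx/real, accumulating the set next_ck; none = early 'return False'
-- (also none on the IndexError cells, which Pre_check excludes)
def checkPass1 (y x : Int) (arr : List (List String)) :
    List (Int × Int × List (Int × Int)) → PySem.Set (Int × Int) → Option (PySem.Set (Int × Int))
  | [], s => some s
  | (d1, d2, r) :: rest, s =>
    let ny := y + d1
    let nx := x + d2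
    if ny < 0 ∨ nx < 0 ∨ 5 ≤ nx ∨ 5 ≤ ny then checkPass1 y x arr rest s
    else
      match checkCell arr ny nx with
      | none => none
      | some c =>
        if c = "P" then none
        else if c = "X" then checkPass1 y x arr rest s
        else if c = "O" then checkPass1 y x arr rest (PySem.Set.update s r)
        else checkPass1 y x arr rest s

-- 'for dy,dx in next_ck' (boolean result is independent of the set's iteration order);
-- the none (IndexError) case, excluded by Pre_check, continues
def checkPass2 (y x : Int) (arr : List (List String)) : List (Int × Int) → Bool
  | [] => true
  | (d1, d2) :: rest =>
    let ny := y + d1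
    let nx := x + d2
    if ny < 0 ∨ nx < 0 ∨ 5 ≤ nx ∨ 5 ≤ ny then checkPass2 y x arr rest
    else
      match checkCell arr ny nx with
      | none => checkPass2 y x arr rest
      | some c =>
        if c = "P" then false
        else if c = "X" then checkPass2 y x arr rest
        else if c = "O" then checkPass2 y x arr rest
        else checkPass2 y x arr rest

def check (y : Int) (x : Int) (arr : List (List String)) : Bool :=
  let dy : List Int := [-1, 0, 1, 0]
  let dx : List Int := [0, 1, 0, -1]
  let real : List (List (Int × Int)) :=
    [[(-2, 0), (-1, 1), (-1, -1)],
     [(0, 2), (1, 1), (-1, 1)],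
     [(2, 0), (1, -1), (1, 1)],
     [(0, -2), (1, -1), (-1, -1)]]
  match checkPass1 y x arr (dy.zip (dx.zip real)) PySem.Set.empty with
  | none => false
  | some s => checkPass2 y x arr s

-- ===== PORT B =====
def pvDirs : List (Int × Int × List (Int × Int)) :=
  [(-1, 0, [(-2, 0), (-1, 1), (-1, -1)]),
   (0, 1, [(0, 2), (1, 1), (-1, 1)]),
   (1, 0, [(2, 0), (1, -1), (1, 1)]),
   (0, -1, [(0, -2), (1, -1), (-1, -1)])]

-- inner 'for ry,rx in real: … return False'; true = a secondary 'P' was found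
def checkAltInner (y x : Int) (arr : List (List String)) : List (Int × Int) → Bool
  | [] => false
  | (ry, rx) :: rest =>
    let my := y + ry
    let mx := x + rx
    if 0 ≤ my ∧ my < 5 ∧ 0 ≤ mx ∧ mx < 5 ∧ checkCell arr my mx = some "P" then true
    else checkAltInner y x arr rest

def checkAltLoop (y x : Int) (arr : List (List String)) :
    List (Int × Int × List (Int × Int)) → Bool
  | [] => true
  | (d1, d2, r) :: rest =>
    let ny := y + d1
    let nx := x + d2
    if ¬(0 ≤ ny ∧ ny < 5 ∧ 0 ≤ nx ∧ nx < 5) then checkAltLoop y x arr rest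
    else
      match checkCell arr ny nx with
      | none => false   -- IndexError in Python; excluded by Pre_check
      | some c =>
        if c = "P" then false
        else if c = "O" then
          if checkAltInner y x arr r then false else checkAltLoop y x arr rest
        else checkAltLoop y x arr rest

def check_alt (y : Int) (x : Int) (arr : List (List String)) : Bool :=
  checkAltLoop y x arr pvDirs

-- ===== PRECONDITION & SPEC =====
-- Pre_check excludes inputs on which some accessed in-grid cell lies outside the ragged
-- array, where A (and B) raise IndexError; it is a slight over-approximation: on inputs
-- where an earlier 'P' neighbour makes A return False before reaching such a cell, A still
-- returns (and B agrees there).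
def Pre_check (y : Int) (x : Int) (arr : List (List String)) : Prop :=
  ∀ t ∈ pvDirs,
    (0 ≤ y + t.1 ∧ y + t.1 < 5 ∧ 0 ≤ x + t.2.1 ∧ x + t.2.1 < 5) →
      (checkCell arr (y + t.1) (x + t.2.1)).isSome ∧
      (checkCell arr (y + t.1) (x + t.2.1) = some "O" →
        ∀ p ∈ t.2.2,
          (0 ≤ y + p.1 ∧ y + p.1 < 5 ∧ 0 ≤ x + p.2 ∧ x + p.2 < 5) →
            (checkCell arr (y + p.1) (x + p.2)).isSome)
instance (y : Int) (x : Int) (arr : List (List String)) : Decidable (Pre_check y x arr) := by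
  unfold Pre_check; infer_instance

def pvWitness_check : Int × Int × List (List String) :=
  (2, 2, [["X", "X", "X", "X", "X"],
          ["X", "X", "X", "X", "X"],
          ["X", "X", "X", "X", "X"],
          ["X", "X", "X", "X", "X"],
          ["X", "X", "X", "X", "X"]])

def Spec_check (y : Int) (x : Int) (arr : List (List String)) (out : Bool) : Prop := out = check_alt y x arr
instance (y : Int) (x : Int) (arr : List (List String)) (out : Bool) : Decidable (Spec_check y x arr out) := by unfold Spec_check; infer_instance

-- ===== CLAIM (what is proved, stated in full; the proofs are below) =====
def Claim_equal_check : Prop := ∀ (y : Int) (x : Int) (arr : List (List String)), Dom_check y x arr → Pre_check y x arr → Spec_check y x arr (check y x arr)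

-- ===== LEMMAS AND PROOFS =====

-- a secondary offset is harmless: out of the 5×5 grid, or its cell is not 'P'
def okCell (y x : Int) (arr : List (List String)) (p : Int × Int) : Bool :=
  let ny := y + p.1
  let nx := x + p.2
  if ny < 0 ∨ nx < 0 ∨ 5 ≤ nx ∨ 5 ≤ ny then true
  else
    match checkCell arr ny nx with
    | none => true
    | some c => !(c = "P" : Bool)

theorem checkPass2_eq_all (y x : Int) (arr : List (List String)) (l : List (Int × Int)) :
    checkPass2 y x arr l = l.all (okCell y x arr) := by
  induction l with
  | nil => rfl
  | cons p rest ih =>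
    obtain ⟨d1, d2⟩ := p
    simp only [checkPass2, okCell, List.all_cons]
    split_ifs with h
    · simp [ih]
    · cases hc : checkCell arr (y + d1) (x + d2) with
      | none => simp [ih]
      | some c =>
        by_cases hP : c = "P"
        · simp [hP]
        · simp only [if_neg hP]
          split_ifs <;> simp [hP, ih]

theorem checkAltInner_eq_not_all (y x : Int) (arr : List (List String)) (l : List (Int × Int)) :
    checkAltInner y x arr l = !(l.all (okCell y x arr)) := by
  induction l with
  | nil => rfl
  | cons p rest ih =>
    obtain ⟨ry, rx⟩ := p
    simp only [checkAltInner, List.all_cons, Bool.not_and]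
    by_cases hg : (0 ≤ y + ry ∧ y + ry < 5 ∧ 0 ≤ x + rx ∧ x + rx < 5)
    · have hg' : ¬(y + ry < 0 ∨ x + rx < 0 ∨ 5 ≤ x + rx ∨ 5 ≤ y + ry) := by omega
      by_cases hP : checkCell arr (y + ry) (x + rx) = some "P"
      · simp [okCell, hg, hg', hP]
      · have : ¬(0 ≤ y + ry ∧ y + ry < 5 ∧ 0 ≤ x + rx ∧ x + rx < 5 ∧
            checkCell arr (y + ry) (x + rx) = some "P") := by tauto
        simp only [if_neg this, ih, okCell]
        rw [if_neg hg']
        cases hc : checkCell arr (y + ry) (x + rx) with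
        | none => simp
        | some c =>
          have : ¬(c = "P") := by rintro rfl; exact hP hc
          simp [this]
    · have hg' : (y + ry < 0 ∨ x + rx < 0 ∨ 5 ≤ x + rx ∨ 5 ≤ y + ry) := by omega
      have : ¬(0 ≤ y + ry ∧ y + ry < 5 ∧ 0 ≤ x + rx ∧ x + rx < 5 ∧
          checkCell arr (y + ry) (x + rx) = some "P") := by tauto
      simp [this, ih, okCell, hg']

theorem all_set_add {α : Type} [BEq α] [LawfulBEq α] (f : α → Bool) (s : PySem.Set α) (a : α) :
    (PySem.Set.add s a).all f = (s.all f && f a) := by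
  by_cases h : a ∈ s
  · have : PySem.Set.add s a = s := by
      simp [PySem.Set.add, h]
    rw [this]
    by_cases hf : s.all f = true
    · have : f a = true := List.all_eq_true.1 hf a h
      simp [hf, this]
    · simp [Bool.eq_false_iff.2 hf]
  · have : PySem.Set.add s a = s ++ [a] := by
      simp only [PySem.Set.add]
      rw [if_neg]
      simp only [PySem.Set.contains_eq_listContains]
      simpa using h
    simp [this]

theorem all_set_update {α : Type} [BEq α] [LawfulBEq α] (f : α → Bool)
    (r : List α) (s : PySem.Set α) :
    (PySem.Set.update s r).all f = (s.all f && r.all f) := by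
  induction r generalizing s with
  | nil => simp [PySem.Set.update]
  | cons a rest ih =>
    have : PySem.Set.update s (a :: rest) = PySem.Set.update (PySem.Set.add s a) rest := rfl
    rw [this, ih, all_set_add]
    simp [Bool.and_assoc]

-- the bridge: pass1-then-pass2 equals B's single loop, with the pending set's obligations
theorem runA_eq (y x : Int) (arr : List (List String))
    (L : List (Int × Int × List (Int × Int))) (s : PySem.Set (Int × Int)) :
    (match checkPass1 y x arr L s with
     | none => false
     | some s' => checkPass2 y x arr s') =
      (checkAltLoop y x arr L && s.all (okCell y x arr)) := by
  induction L generalizing s with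
  | nil => simp [checkPass1, checkAltLoop, checkPass2_eq_all]
  | cons t rest ih =>
    obtain ⟨d1, d2, r⟩ := t
    simp only [checkPass1, checkAltLoop]
    by_cases hg : (y + d1 < 0 ∨ x + d2 < 0 ∨ 5 ≤ x + d2 ∨ 5 ≤ y + d1)
    · have hg' : ¬(0 ≤ y + d1 ∧ y + d1 < 5 ∧ 0 ≤ x + d2 ∧ x + d2 < 5) := by omega
      simp only [if_pos hg, if_pos hg', ih]
    · have hg' : (0 ≤ y + d1 ∧ y + d1 < 5 ∧ 0 ≤ x + d2 ∧ x + d2 < 5) := by omega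
      simp only [if_neg hg, if_neg (not_not_intro hg')]
      cases hc : checkCell arr (y + d1) (x + d2) with
      | none => rfl
      | some c =>
        by_cases hP : c = "P"
        · simp [hP]
        · simp only [if_neg hP]
          by_cases hX : c = "X"
          · have hO : ¬(c = "O") := by rw [hX]; decide
            simp [hX, ih]
          · by_cases hO : c = "O"
            · simp only [if_pos hO, if_neg hX, ih, all_set_update,
                checkAltInner_eq_not_all]
              cases hr : r.all (okCell y x arr) <;>
                cases checkAltLoop y x arr rest <;> simp
            · simp [hX, hO, ih]

-- ===== VERDICT (by name: the statement is the Claim_ definition above) =====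
theorem check_spec : Claim_equal_check := by
  intro y x arr _ _
  show check y x arr = check_alt y x arr
  have h := runA_eq y x arr pvDirs PySem.Set.empty
  simp only [PySem.Set.empty, List.all_nil, Bool.and_true] at h
  exact h
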